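-- pv_equiv track=rewrite | github.com/wyk18703232953/myResearch | codeComplex/data/filteredData/python/linear/python_linear_0787.py | check
-- ===== SOURCE A (Python) =====
-- from collections import Counter
--
-- def check(A):
--     CA = Counter(A)
--     if CA[0] >= 2:
--         return False
--     cnt = 0
--     for k, v in CA.items():
--         if v > 2:
--             return False
--         if v == 2 and CA[k - 1] >= 1:
--             return False
--         if v >= 2:
--             cnt += 1
--     if cnt >= 2:
--         return False
--     L = len(A)
--     if (sum(A) - L * (L - 1) // 2) % 2 == 0:
--         return False
--     return True
-- ===== SOURCE B (Python) =====
-- def check(A):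
--     S = set(A)
--     s = sorted(A)
--     # run-length encode the sorted copy
--     runs = []
--     i = 0
--     while i < len(s):
--         j = i
--         while j < len(s) and s[j] == s[i]:
--             j += 1
--         runs.append((s[i], j - i))
--         i = j
--     dup_runs = 0
--     for v, c in runs:
--         if c > 2:
--             return False
--         if c == 2:
--             if v == 0 or (v - 1) in S:
--                 return False
--             dup_runs += 1
--             if dup_runs >= 2:
--                 return False
--     L = len(A)
--     if (sum(A) - L * (L - 1) // 2) % 2 == 0:
--         return False
--     return True
-- ===== Notes on version B (the rewrite author's own statement) =====
-- stated objective: alternative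
-- what changed: B replaces A's Counter hash-map pass by a sorting-based algorithm: it sorts a copy of A, run-length-encodes the sorted list to obtain each value's multiplicity, then scans the runs (bailing out on a run longer than 2, a duplicated 0, a duplicate whose predecessor is in set(A), or a second duplicated run) before the same parity test.
import Mathlib
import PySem

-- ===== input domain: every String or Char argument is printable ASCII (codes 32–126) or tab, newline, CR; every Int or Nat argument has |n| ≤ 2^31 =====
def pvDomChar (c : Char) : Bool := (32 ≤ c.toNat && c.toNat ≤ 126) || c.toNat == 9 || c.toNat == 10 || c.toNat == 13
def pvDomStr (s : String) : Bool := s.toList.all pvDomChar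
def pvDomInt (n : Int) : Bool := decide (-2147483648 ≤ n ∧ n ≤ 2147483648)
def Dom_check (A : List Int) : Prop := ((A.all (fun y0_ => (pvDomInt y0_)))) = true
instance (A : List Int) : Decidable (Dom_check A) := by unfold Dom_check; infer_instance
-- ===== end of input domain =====

-- B replaces A's Counter hash pass by a sorting-based algorithm (sort, run-length encode, scan
-- the runs, then the same parity test); objective: alternative (same return value everywhere).

-- ===== PORT A =====
-- A's for-loop over CA.items with its early returns: none = 'return False', some cnt = fell through
def checkLoop (CA : PySem.Dict Int Int) : List (Int × Int) → Int → Option Int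
  | [], cnt => some cnt
  | (k, v) :: rest, cnt =>
    if 2 < v then none
    else if v = 2 ∧ 1 ≤ CA.getD (k - 1) 0 then none
    else checkLoop CA rest (if 2 ≤ v then cnt + 1 else cnt)

def check (A : List Int) : Bool :=
  let CA := PySem.Dict.counter A
  if 2 ≤ CA.getD 0 0 then false
  else
    match checkLoop CA CA.items 0 with
    | none => false
    | some cnt =>
      if 2 ≤ cnt then false
      else
        let L : Int := A.length
        if PySem.Int.mod (A.sum - PySem.Int.floordiv (L * (L - 1)) 2) 2 = 0 then false
        else true

-- ===== PORT B =====
-- Source B's while-loop over indices i/j: run-length encoding of the (sorted) list, as the obvious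
-- structural recursion (the inner 'while s[j] == s[i]' scan is the takeWhile/dropWhile split)
def runsOf : List Int → List (Int × Int)
  | [] => []
  | x :: t =>
    (x, 1 + ((t.takeWhile (fun y => y == x)).length : Int)) ::
      runsOf (t.dropWhile (fun y => y == x))
termination_by l => l.length
decreasing_by
  simp only [List.length_cons]
  exact Nat.lt_succ_of_le (t.length_dropWhile_le _)

-- Source B's for-loop over the runs with its early returns: none = 'return False'
def scanRuns (S : PySem.Set Int) : List (Int × Int) → Int → Option Int
  | [], dr => some dr
  | (v, c) :: rest, dr =>
    if 2 < c then none
    else if c = 2 then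
      if v = 0 ∨ PySem.Set.contains S (v - 1) = true then none
      else if 2 ≤ dr + 1 then none
      else scanRuns S rest (dr + 1)
    else scanRuns S rest dr

def check_alt (A : List Int) : Bool :=
  let S := PySem.Set.ofList A
  let runs := runsOf (PySem.List.sorted A (fun x => x) false)
  match scanRuns S runs 0 with
  | none => false
  | some _ =>
    let L : Int := A.length
    if PySem.Int.mod (A.sum - PySem.Int.floordiv (L * (L - 1)) 2) 2 = 0 then false
    else true

-- ===== PRECONDITION & SPEC =====
def Spec_check (A : List Int) (out : Bool) : Prop := out = check_alt A
instance (A : List Int) (out : Bool) : Decidable (Spec_check A out) := by unfold Spec_check; infer_instance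

-- ===== CLAIM (what is proved, stated in full; the proofs are below) =====
def Claim_equal_check : Prop := ∀ (A : List Int), Dom_check A → Spec_check A (check A)

-- ===== LEMMAS AND PROOFS =====

-- the common 'return False' condition, phrased over counts in A
def PFalse (A : List Int) : Prop :=
  (2 ≤ (A.count 0 : Int) ∨
    ∃ v ∈ A, 2 < (A.count v : Int) ∨ ((A.count v : Int) = 2 ∧ v - 1 ∈ A)) ∨
  2 ≤ (((PySem.Set.ofList A).filter (fun v => decide (2 ≤ (A.count v : Int)))).length : Int) ∨
  PySem.Int.mod (A.sum - PySem.Int.floordiv ((A.length : Int) * ((A.length : Int) - 1)) 2) 2 = 0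

lemma mem_iff_one_le_count (A : List Int) (x : Int) : x ∈ A ↔ 1 ≤ (A.count x : Int) := by
  rw [← List.count_pos_iff]
  exact_mod_cast Iff.rfl

-- characterization of A's loop when run on the counter's items
lemma checkLoop_char (A : List Int) (l : List Int) (cnt : Int) :
    checkLoop (PySem.Dict.counter A) (l.map (fun k => (k, (A.count k : Int)))) cnt =
      if l.any (fun k => decide (2 < (A.count k : Int)) ||
          (decide ((A.count k : Int) = 2) && decide (1 ≤ (A.count (k - 1) : Int))))
      then none
      else some (cnt + ((l.filter (fun k => decide (2 ≤ (A.count k : Int)))).length : Int)) := by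
  induction l generalizing cnt with
  | nil => simp [checkLoop]
  | cons k rest ih =>
    simp only [List.map_cons, checkLoop, PySem.Dict.getD_counter, List.any_cons, List.filter_cons]
    by_cases h1 : 2 < (A.count k : Int)
    · simp [h1]
    · rw [if_neg h1]
      by_cases h2 : (A.count k : Int) = 2 ∧ 1 ≤ (A.count (k - 1) : Int)
      · rw [if_pos h2]
        have hb : (decide (2 < (A.count k : Int)) ||
            (decide ((A.count k : Int) = 2) && decide (1 ≤ (A.count (k - 1) : Int)))) = true := by
          simp [h2.1, h2.2]
        rw [hb, Bool.true_or, if_pos rfl]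
      · rw [if_neg h2]
        have hb : (decide (2 < (A.count k : Int)) ||
            (decide ((A.count k : Int) = 2) && decide (1 ≤ (A.count (k - 1) : Int)))) = false := by
          rcases em ((A.count k : Int) = 2) with he | he
          · have hm : ¬ 1 ≤ (A.count (k - 1) : Int) := fun hm => h2 ⟨he, hm⟩
            simp [he, hm]
          · simp [h1, he]
        rw [hb, Bool.false_or]
        by_cases h4 : 2 ≤ (A.count k : Int)
        · rw [if_pos h4, if_pos (show decide (2 ≤ (A.count k : Int)) = true by simpa using h4), ih]
          split
          · rfl
          · simp only [Option.some.injEq, List.length_cons]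
            push_cast
            ring
        · rw [if_neg h4, if_neg (show ¬ decide (2 ≤ (A.count k : Int)) = true by simpa using h4), ih]

-- A returns False exactly on PFalse
lemma checkA_false (A : List Int) : check A = false ↔ PFalse A := by
  unfold check PFalse
  simp only [PySem.Dict.items_counter, PySem.Dict.getD_counter]
  rw [checkLoop_char]
  by_cases h0 : 2 ≤ (A.count 0 : Int)
  · rw [if_pos h0]
    simp [h0]
  · rw [if_neg h0]
    by_cases hA : (PySem.Set.ofList A).any (fun k => decide (2 < (A.count k : Int)) ||
        (decide ((A.count k : Int) = 2) && decide (1 ≤ (A.count (k - 1) : Int)))) = true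
    · rw [if_pos hA]
      simp only [List.any_eq_true, PySem.Set.mem_ofList, Bool.or_eq_true, Bool.and_eq_true,
        decide_eq_true_eq] at hA
      obtain ⟨k, hk, hbad⟩ := hA
      constructor
      · intro _
        refine Or.inl (Or.inr ⟨k, hk, ?_⟩)
        rcases hbad with h | ⟨h2, hm⟩
        · exact Or.inl h
        · exact Or.inr ⟨h2, (mem_iff_one_le_count A (k - 1)).2 hm⟩
      · intro _; rfl
    · rw [if_neg hA]
      dsimp only
      have hnb : ¬ (2 ≤ (A.count 0 : Int) ∨
          ∃ v ∈ A, 2 < (A.count v : Int) ∨ ((A.count v : Int) = 2 ∧ v - 1 ∈ A)) := by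
        rintro (h | ⟨v, hv, hbad⟩)
        · exact h0 h
        · apply hA
          simp only [List.any_eq_true, PySem.Set.mem_ofList, Bool.or_eq_true, Bool.and_eq_true,
            decide_eq_true_eq]
          refine ⟨v, hv, ?_⟩
          rcases hbad with h | ⟨h2, hm⟩
          · exact Or.inl h
          · exact Or.inr ⟨h2, (mem_iff_one_le_count A (v - 1)).1 hm⟩
      by_cases hc : 2 ≤ (0 : Int) + (((PySem.Set.ofList A).filter
          (fun v => decide (2 ≤ (A.count v : Int)))).length : Int)
      · rw [if_pos hc]
        constructor
        · intro _
          exact Or.inr (Or.inl (by omega))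
        · intro _
          rfl
      · rw [if_neg hc]
        by_cases hp : PySem.Int.mod (A.sum - PySem.Int.floordiv ((A.length : Int) *
            ((A.length : Int) - 1)) 2) 2 = 0
        · rw [if_pos hp]
          constructor
          · intro _
            exact Or.inr (Or.inr hp)
          · intro _
            rfl
        · rw [if_neg hp]
          constructor
          · intro h; exact absurd h (by simp)
          · rintro (h | h | h)
            · exact absurd h hnb
            · exact absurd (by omega : 2 ≤ (0 : Int) + _) hc
            · exact absurd h hp

-- the pivot value does not survive its own dropWhile on a nondecreasing tail
lemma not_mem_dropWhile_self (x : Int) (t : List Int)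
    (hl : (x :: t).Pairwise (fun a b : Int => a ≤ b)) :
    x ∉ t.dropWhile (fun y => y == x) := by
  have hpair := List.pairwise_cons.1 hl
  intro hx
  cases hdw : t.dropWhile (fun y => y == x) with
  | nil => rw [hdw] at hx; simp at hx
  | cons h tl =>
    have hh : ¬ (h == x) = true := by
      have := List.head_dropWhile_not (fun y => y == x) (l := t) (by simp [hdw])
      simpa [hdw] using this
    have hhx : h ≠ x := by simpa using hh
    have hdsub : List.Sublist (t.dropWhile (fun y => y == x)) t := List.dropWhile_sublist _
    have hhm : h ∈ t := hdsub.mem (by simp [hdw])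
    have hxh : x ≤ h := hpair.1 h hhm
    rw [hdw] at hx
    rcases List.mem_cons.1 hx with rfl | hx'
    · exact hhx rfl
    · have hdp : (h :: tl).Pairwise (fun a b : Int => a ≤ b) := by
        rw [← hdw]; exact hpair.2.sublist hdsub
      have := (List.pairwise_cons.1 hdp).1 x hx'
      exact hhx (le_antisymm this hxh)

-- run-length encoding of a nondecreasing list: runs are exactly (value, its count)
lemma runsOf_mem (l : List Int) (hl : l.Pairwise (· ≤ ·)) (v c : Int) :
    (v, c) ∈ runsOf l ↔ v ∈ l ∧ c = (l.count v : Int) := by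
  induction l using runsOf.induct with
  | case1 => simp [runsOf]
  | case2 x t ih =>
    have hpair := List.pairwise_cons.1 hl
    have htw : ∀ y ∈ t.takeWhile (fun y => y == x), y = x := by
      intro y hy
      have := List.mem_takeWhile_imp hy
      simpa using this
    have hxdw : x ∉ t.dropWhile (fun y => y == x) := not_mem_dropWhile_self x t hl
    have hsplit : t.takeWhile (fun y => y == x) ++ t.dropWhile (fun y => y == x) = t :=
      t.takeWhile_append_dropWhile
    have hcx : ((x :: t).count x : Int) = 1 + ((t.takeWhile (fun y => y == x)).length : Int) := by
      have h1 : (x :: t).count x = t.count x + 1 := List.count_cons_self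
      have h2 : t.count x = (t.takeWhile (fun y => y == x)).count x
          + (t.dropWhile (fun y => y == x)).count x := by
        rw [← List.count_append, hsplit]
      have h3 : (t.takeWhile (fun y => y == x)).count x
          = (t.takeWhile (fun y => y == x)).length :=
        List.count_eq_length.2 (fun y hy => by simp [htw y hy])
      have h4 : (t.dropWhile (fun y => y == x)).count x = 0 :=
        List.count_eq_zero.2 hxdw
      omega
    have hcother : ∀ w : Int, w ≠ x →
        ((x :: t).count w : Int) = ((t.dropWhile (fun y => y == x)).count w : Int) := by
      intro w hw
      have h1 : (x :: t).count w = t.count w := List.count_cons_of_ne (Ne.symm hw)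
      have h2 : t.count w = (t.takeWhile (fun y => y == x)).count w
          + (t.dropWhile (fun y => y == x)).count w := by
        rw [← List.count_append, hsplit]
      have h3 : (t.takeWhile (fun y => y == x)).count w = 0 :=
        List.count_eq_zero.2 (fun hm => hw (htw w hm))
      omega
    have hdwpw : (t.dropWhile (fun y => y == x)).Pairwise (fun a b : Int => a ≤ b) :=
      hpair.2.sublist (List.dropWhile_sublist _)
    rw [runsOf]
    simp only [List.mem_cons, Prod.mk.injEq, ih hdwpw]
    constructor
    · rintro (⟨rfl, rfl⟩ | ⟨hm, rfl⟩)
      · exact ⟨Or.inl rfl, hcx.symm⟩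
      · have hvx : v ≠ x := fun h => hxdw (h ▸ hm)
        refine ⟨Or.inr ((List.dropWhile_sublist _).mem hm), ?_⟩
        rw [hcother v hvx]
    · rintro ⟨hm, rfl⟩
      by_cases hvx : v = x
      · subst hvx
        exact Or.inl ⟨rfl, hcx⟩
      · rcases hm with h | h
        · exact absurd h hvx
        · have hvt : v ∈ t.takeWhile (fun y => y == x) ++ t.dropWhile (fun y => y == x) := by
            rw [hsplit]; exact h
          rcases List.mem_append.1 hvt with h' | h'
          · exact absurd (htw v h') hvx
          · exact Or.inr ⟨h', hcother v hvx⟩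

-- the run values are distinct
lemma runsOf_fst_nodup (l : List Int) (hl : l.Pairwise (· ≤ ·)) :
    ((runsOf l).map Prod.fst).Nodup := by
  induction l using runsOf.induct with
  | case1 => simp [runsOf]
  | case2 x t ih =>
    have hpair := List.pairwise_cons.1 hl
    have hdwpw : (t.dropWhile (fun y => y == x)).Pairwise (fun a b : Int => a ≤ b) :=
      hpair.2.sublist (List.dropWhile_sublist _)
    rw [runsOf]
    simp only [List.map_cons, List.nodup_cons]
    refine ⟨?_, ih hdwpw⟩
    intro hx
    obtain ⟨⟨v, c⟩, hm, hv⟩ := List.mem_map.1 hx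
    obtain ⟨hmem, -⟩ := (runsOf_mem _ hdwpw v c).1 hm
    exact not_mem_dropWhile_self x t hl (hv ▸ hmem)

-- characterization of B's scan over the runs (the counter starts at 0 and never exceeds 1)
lemma scanRuns_char (S : PySem.Set Int) (runs : List (Int × Int)) (dr : Int) (hdr : dr ≤ 1) :
    (scanRuns S runs dr = none ↔
      (∃ r ∈ runs, 2 < r.2 ∨ (r.2 = 2 ∧ (r.1 = 0 ∨ PySem.Set.contains S (r.1 - 1) = true))) ∨
      2 ≤ dr + (runs.countP (fun r => decide (2 ≤ r.2)) : Int)) := by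
  induction runs generalizing dr with
  | nil =>
    simp only [scanRuns, List.countP_nil]
    constructor
    · intro h; exact absurd h (by simp)
    · rintro (⟨r, hr, -⟩ | h)
      · exact absurd hr (List.not_mem_nil)
      · omega
  | cons r rest ih =>
    obtain ⟨v, c⟩ := r
    rw [scanRuns]
    by_cases h1 : 2 < c
    · rw [if_pos h1]
      simp only [true_iff]
      exact Or.inl ⟨(v, c), List.mem_cons_self, Or.inl h1⟩
    · rw [if_neg h1]
      by_cases h2 : c = 2
      · rw [if_pos h2]
        have hcP : (List.countP (fun r => decide (2 ≤ r.2)) ((v, c) :: rest) : Int)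
            = 1 + (List.countP (fun r => decide (2 ≤ r.2)) rest : Int) := by
          rw [List.countP_cons]
          have hdec : decide (2 ≤ (v, c).2) = true := by simp [h2]
          rw [hdec, if_pos (rfl : true = true)]
          push_cast
          omega
        by_cases h3 : v = 0 ∨ PySem.Set.contains S (v - 1) = true
        · rw [if_pos h3]
          simp only [true_iff]
          exact Or.inl ⟨(v, c), List.mem_cons_self, Or.inr ⟨h2, h3⟩⟩
        · rw [if_neg h3]
          by_cases h4 : 2 ≤ dr + 1
          · rw [if_pos h4]
            simp only [true_iff]
            refine Or.inr ?_
            rw [hcP]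
            have hnn : (0 : Int) ≤ (List.countP (fun r => decide (2 ≤ r.2)) rest : Int) :=
              Int.natCast_nonneg _
            omega
          · rw [if_neg h4, ih (dr + 1) (by omega)]
            constructor
            · rintro (⟨r', hr', hbad⟩ | hc)
              · exact Or.inl ⟨r', List.mem_cons_of_mem _ hr', hbad⟩
              · exact Or.inr (by omega)
            · rintro (⟨r', hr', hbad⟩ | hc)
              · rcases List.mem_cons.1 hr' with rfl | hr''
                · rcases hbad with h | ⟨-, h⟩
                  · exact absurd h h1
                  · exact absurd h h3
                · exact Or.inl ⟨r', hr'', hbad⟩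
              · exact Or.inr (by omega)
      · rw [if_neg h2, ih dr hdr]
        have hcP : (List.countP (fun r => decide (2 ≤ r.2)) ((v, c) :: rest) : Int)
            = (List.countP (fun r => decide (2 ≤ r.2)) rest : Int) := by
          rw [List.countP_cons]
          have hcc : ¬ (2 ≤ c) := by omega
          simp [hcc]
        constructor
        · rintro (⟨r', hr', hbad⟩ | hc)
          · exact Or.inl ⟨r', List.mem_cons_of_mem _ hr', hbad⟩
          · exact Or.inr (by omega)
        · rintro (⟨r', hr', hbad⟩ | hc)
          · rcases List.mem_cons.1 hr' with rfl | hr''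
            · rcases hbad with h | ⟨h, -⟩
              · exact absurd h h1
              · exact absurd h h2
            · exact Or.inl ⟨r', hr'', hbad⟩
          · exact Or.inr (by omega)

-- B returns False exactly on PFalse
lemma checkB_false (A : List Int) : check_alt A = false ↔ PFalse A := by
  unfold check_alt
  dsimp only
  set s := PySem.List.sorted A (fun x => x) false with hs
  have hperm : s.Perm A := PySem.List.sorted_perm A (fun x => x) false
  have hpw : s.Pairwise (fun a b : Int => a ≤ b) := PySem.List.sorted_pairwise A (fun x => x)
  have hcnt : ∀ v : Int, s.count v = A.count v := fun v => hperm.count_eq v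
  have hmemA : ∀ v : Int, v ∈ s ↔ v ∈ A := fun v => hperm.mem_iff
  -- membership in runs
  have hruns : ∀ v c : Int, (v, c) ∈ runsOf s ↔ v ∈ A ∧ c = (A.count v : Int) := by
    intro v c
    rw [runsOf_mem s hpw, hmemA, hcnt]
  -- the dup-run count equals the distinct-duplicate count over A
  have hcount : ((runsOf s).countP (fun r => decide (2 ≤ r.2)) : Int) =
      (((PySem.Set.ofList A).filter (fun v => decide (2 ≤ (A.count v : Int)))).length : Int) := by
    have h1 : (runsOf s).countP (fun r => decide (2 ≤ r.2)) =
        ((runsOf s).filter (fun r => decide (2 ≤ r.2))).length := List.countP_eq_length_filter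
    have h2 : (runsOf s).filter (fun r => decide (2 ≤ r.2)) =
        (runsOf s).filter (fun r => decide (2 ≤ (A.count r.1 : Int))) := by
      apply List.filter_congr
      intro r hr
      obtain ⟨v, c⟩ := r
      obtain ⟨-, rfl⟩ := (hruns v c).1 hr
      rfl
    have h3 : (((runsOf s).filter (fun r => decide (2 ≤ (A.count r.1 : Int)))).map
        Prod.fst).Perm ((PySem.Set.ofList A).filter (fun v => decide (2 ≤ (A.count v : Int)))) := by
      have hnd1 : (((runsOf s).filter (fun r => decide (2 ≤ (A.count r.1 : Int)))).map
          Prod.fst).Nodup := by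
        have := runsOf_fst_nodup s hpw
        exact (List.Sublist.map Prod.fst List.filter_sublist).nodup this
      have hnd2 : ((PySem.Set.ofList A).filter
          (fun v => decide (2 ≤ (A.count v : Int)))).Nodup :=
        (PySem.Set.nodup_ofList A).filter _
      rw [List.perm_ext_iff_of_nodup hnd1 hnd2]
      intro y
      simp only [List.mem_map, List.mem_filter, PySem.Set.mem_ofList]
      constructor
      · rintro ⟨⟨v, c⟩, ⟨hm, hp⟩, rfl⟩
        obtain ⟨hv, rfl⟩ := (hruns v c).1 hm
        exact ⟨hv, hp⟩
      · rintro ⟨hy, hp⟩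
        exact ⟨(y, (A.count y : Int)), ⟨(hruns y _).2 ⟨hy, rfl⟩, hp⟩, rfl⟩
    rw [h1, h2, ← h3.length_eq, List.length_map]
  -- the bad-run existence matches A's bad condition
  have hbad : ((∃ r ∈ runsOf s, 2 < r.2 ∨ (r.2 = 2 ∧ (r.1 = 0 ∨
        PySem.Set.contains (PySem.Set.ofList A) (r.1 - 1) = true)))) ↔
      (2 ≤ (A.count 0 : Int) ∨
        ∃ v ∈ A, 2 < (A.count v : Int) ∨ ((A.count v : Int) = 2 ∧ v - 1 ∈ A)) := by
    constructor
    · rintro ⟨⟨v, c⟩, hm, hbad⟩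
      obtain ⟨hv, rfl⟩ := (hruns v c).1 hm
      rcases hbad with h | ⟨h2, h3⟩
      · exact Or.inr ⟨v, hv, Or.inl h⟩
      · rcases h3 with rfl | h3
        · exact Or.inl (by omega)
        · have : v - 1 ∈ A := (PySem.Set.mem_ofList A _).1 ((PySem.Set.contains_iff _ _).1 h3)
          exact Or.inr ⟨v, hv, Or.inr ⟨h2, this⟩⟩
    · rintro (h0 | ⟨v, hv, hbad⟩)
      · have h0m : (0 : Int) ∈ A := (mem_iff_one_le_count A 0).2 (by omega)
        by_cases h2 : (A.count 0 : Int) = 2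
        · exact ⟨(0, (A.count 0 : Int)), (hruns 0 _).2 ⟨h0m, rfl⟩, Or.inr ⟨h2, Or.inl rfl⟩⟩
        · exact ⟨(0, (A.count 0 : Int)), (hruns 0 _).2 ⟨h0m, rfl⟩, Or.inl (by omega)⟩
      · rcases hbad with h | ⟨h2, h3⟩
        · exact ⟨(v, (A.count v : Int)), (hruns v _).2 ⟨hv, rfl⟩, Or.inl h⟩
        · have hc : PySem.Set.contains (PySem.Set.ofList A) (v - 1) = true :=
            (PySem.Set.contains_iff _ _).2 ((PySem.Set.mem_ofList A _).2 h3)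
          exact ⟨(v, (A.count v : Int)), (hruns v _).2 ⟨hv, rfl⟩, Or.inr ⟨h2, Or.inr hc⟩⟩
  unfold PFalse
  cases hscan : scanRuns (PySem.Set.ofList A) (runsOf s) 0 with
  | none =>
    have hch := (scanRuns_char (PySem.Set.ofList A) (runsOf s) 0 (by norm_num)).1 hscan
    refine iff_of_true rfl ?_
    rcases hch with h | h
    · exact Or.inl (hbad.1 h)
    · rw [hcount] at h
      exact Or.inr (Or.inl (by omega))
  | some d =>
    dsimp only
    have hns : ¬ (scanRuns (PySem.Set.ofList A) (runsOf s) 0 = none) := by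
      rw [hscan]; simp
    rw [scanRuns_char (PySem.Set.ofList A) (runsOf s) 0 (by norm_num)] at hns
    push_neg at hns
    obtain ⟨hns1, hns2⟩ := hns
    by_cases hp : PySem.Int.mod (A.sum - PySem.Int.floordiv ((A.length : Int) *
        ((A.length : Int) - 1)) 2) 2 = 0
    · rw [if_pos hp]
      exact iff_of_true rfl (Or.inr (Or.inr hp))
    · rw [if_neg hp]
      refine iff_of_false (by simp) ?_
      rintro (h | h | h)
      · exact absurd (hbad.2 h) (by simpa using hns1)
      · rw [hcount] at hns2; omega
      · exact absurd h hp

lemma check_eq (A : List Int) : check A = check_alt A := by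
  cases hA : check A with
  | false =>
    exact ((checkB_false A).2 ((checkA_false A).1 hA)).symm
  | true =>
    cases hB : check_alt A with
    | false =>
      have := (checkA_false A).2 ((checkB_false A).1 hB)
      rw [hA] at this
      exact absurd this (by simp)
    | true => rfl

-- ===== VERDICT (by name: the statement is the Claim_ definition above) =====
theorem check_spec : Claim_equal_check := by
  intro A _
  exact check_eq A
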